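-- pv_equiv track=rewrite | github.com/liqcui/ocp-benchmark-analyzer | tools/api/ocp_kubeapi.py | _format_labels
-- ===== SOURCE A (Python) =====
-- from typing import Dict, List, Any, Optional
--
-- def _format_labels(labels: Dict[str, str]) -> str:
--     """Format labels into a readable string"""
--     parts = []
--     priority_keys = ['resource', 'verb', 'scope', 'instance', 'operation',
--                     'type', 'service', 'group', 'kind']
--
--     for key in priority_keys:
--         if key in labels:
--             parts.append(labels[key])
--
--     # Add any remaining labels
--     for key, value in labels.items():
--         if key not in priority_keys and key != '__name__':
--             parts.append(f"{key}={value}")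
--
--     return ':'.join(parts) if parts else 'unknown'
-- ===== SOURCE B (Python) =====
-- PRIORITY_KEYS = ['resource', 'verb', 'scope', 'instance', 'operation',
--                  'type', 'service', 'group', 'kind']
--
-- def _format_labels(labels):
--     """One pass + stable sort by priority rank, instead of two passes."""
--     sentinel = len(PRIORITY_KEYS)
--     entries = []
--     for key, value in labels.items():
--         if key == '__name__':
--             continue
--         r = PRIORITY_KEYS.index(key) if key in PRIORITY_KEYS else sentinel
--         entries.append((r, value if r < sentinel else f"{key}={value}"))
--     entries = sorted(entries, key=lambda t: t[0])
--     texts = [t[1] for t in entries]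
--     return ':'.join(texts) if texts else 'unknown'
-- ===== Notes on version B (the rewrite author's own statement) =====
-- stated objective: alternative
-- what changed: Replaces A's two passes (one over the 9 priority keys doing a dict lookup each, one over the items for the rest) by a single pass over the items that tags each entry with a priority rank, followed by a stable sort on the rank and one join.
import Mathlib
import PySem

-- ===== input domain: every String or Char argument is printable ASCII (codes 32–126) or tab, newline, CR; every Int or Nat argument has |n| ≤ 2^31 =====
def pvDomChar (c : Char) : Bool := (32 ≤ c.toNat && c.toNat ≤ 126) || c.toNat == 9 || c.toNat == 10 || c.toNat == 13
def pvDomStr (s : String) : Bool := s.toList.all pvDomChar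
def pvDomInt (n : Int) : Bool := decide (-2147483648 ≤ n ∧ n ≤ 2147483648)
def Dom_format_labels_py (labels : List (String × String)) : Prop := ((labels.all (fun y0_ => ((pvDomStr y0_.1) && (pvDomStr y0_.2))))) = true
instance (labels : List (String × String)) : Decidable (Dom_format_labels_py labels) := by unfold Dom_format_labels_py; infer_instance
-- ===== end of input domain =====

-- B replaces A's two passes (priority-key lookups, then the remaining items) by one pass that
-- tags each item with a priority rank plus a stable sort on the rank; alternative decomposition, not faster.


-- the fixed priority-key list both programs use
def pvPriority : List String :=
  ["resource", "verb", "scope", "instance", "operation", "type", "service", "group", "kind"]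

-- ===== PORT A =====
-- `key in labels` + `labels[key]` on the dict = first-match lookup on the association list
def format_labels_py (labels : List (String × String)) : String :=
  let parts : List String :=
    pvPriority.foldl (fun acc key =>
      match labels.lookup key with
      | some v => acc ++ [v]
      | none => acc) []
  let parts : List String :=
    labels.foldl (fun acc kv =>
      if kv.1 ∉ pvPriority ∧ kv.1 ≠ "__name__" then acc ++ [kv.1 ++ "=" ++ kv.2] else acc) parts
  if parts.isEmpty then "unknown" else PySem.Str.join ":" parts

-- ===== PORT B =====
def format_labels_py_alt (labels : List (String × String)) : String :=
  let entries : List (Int × String) :=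
    labels.foldl (fun (acc : List (Int × String)) (kv : String × String) =>
      if kv.1 = "__name__" then acc
      else
        let sentinel : Int := (pvPriority.length : Int)
        let r : Int :=
          match PySem.List.index? pvPriority kv.1 with
          | some i => (i : Int)
          | none => sentinel
        acc ++ [(r, if r < sentinel then kv.2 else kv.1 ++ "=" ++ kv.2)]) []
  let entries := PySem.List.sorted entries (fun t => t.1) false
  let texts := entries.map (fun t => t.2)
  if texts.isEmpty then "unknown" else PySem.Str.join ":" texts

-- ===== PRECONDITION & SPEC =====
-- Pre_ excludes association lists with duplicate keys: no Python dict produces them, and on such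
-- lists the first-match assoc-list reading of A diverges from B (A keeps only the first value of a
-- duplicated priority key, B keeps every occurrence) — a corner where neither value is specified.
def Pre_format_labels_py (labels : List (String × String)) : Prop :=
  (labels.map Prod.fst).Nodup
instance (labels : List (String × String)) : Decidable (Pre_format_labels_py labels) := by
  unfold Pre_format_labels_py; infer_instance

def pvWitness_format_labels_py : (List (String × String)) :=
  [("verb", "get"), ("code", "200"), ("resource", "pods")]

def Spec_format_labels_py (labels : List (String × String)) (out : String) : Prop := out = format_labels_py_alt labels
instance (labels : List (String × String)) (out : String) : Decidable (Spec_format_labels_py labels out) := by unfold Spec_format_labels_py; infer_instance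

-- ===== CLAIM (what is proved, stated in full; the proofs are below) =====
def Claim_equal_format_labels_py : Prop := ∀ (labels : List (String × String)), Dom_format_labels_py labels → Pre_format_labels_py labels → Spec_format_labels_py labels (format_labels_py labels)

-- ===== LEMMAS AND PROOFS =====

-- proof-side abbreviations for B's per-item entry
def pvRank (k : String) : Int :=
  match PySem.List.index? pvPriority k with
  | some i => (i : Int)
  | none => (pvPriority.length : Int)

def pvG (kv : String × String) : Option (Int × String) :=
  if kv.1 = "__name__" then none
  else some (pvRank kv.1, if pvRank kv.1 < (pvPriority.length : Int) then kv.2 else kv.1 ++ "=" ++ kv.2)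

theorem pvLen : (pvPriority.length : Int) = 9 := by decide

theorem pvRank_bounds (k : String) : 0 ≤ pvRank k ∧ pvRank k < 10 := by
  unfold pvRank
  cases h : PySem.List.index? pvPriority k with
  | none =>
    have e : (match (none : Option Nat) with | some i => (i : Int) | none => (pvPriority.length : Int)) = (pvPriority.length : Int) := rfl
    rw [e]; decide
  | some i =>
    obtain ⟨hk, -, -⟩ := PySem.List.getElem_of_index?_eq_some h
    have hi : i < 9 := by simpa [pvPriority] using hk
    have e : (match (some i : Option Nat) with | some i => (i : Int) | none => (pvPriority.length : Int)) = (i : Int) := rfl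
    rw [e]
    omega

theorem pvRank_eq_iff (s : String) (r : Nat) (hr : PySem.List.index? pvPriority s = some r) (k : String) :
    pvRank k = (r : Int) ↔ k = s := by
  obtain ⟨hrlt, hs, -⟩ := PySem.List.getElem_of_index?_eq_some hr
  constructor
  · intro h
    unfold pvRank at h
    cases hk : PySem.List.index? pvPriority k with
    | none =>
      rw [hk] at h
      have e : (match (none : Option Nat) with | some i => (i : Int) | none => (pvPriority.length : Int)) = (pvPriority.length : Int) := rfl
      rw [e, pvLen] at h
      have : r < 9 := by simpa [pvPriority] using hrlt
      omega
    | some i =>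
      rw [hk] at h
      have e : (match (some i : Option Nat) with | some i => (i : Int) | none => (pvPriority.length : Int)) = (i : Int) := rfl
      rw [e] at h
      have hir : i = r := by exact_mod_cast h
      subst hir
      obtain ⟨h1, hk2, -⟩ := PySem.List.getElem_of_index?_eq_some hk
      rw [← hk2, hs]
  · rintro rfl
    unfold pvRank
    rw [hr]

theorem pvRank_eq_sentinel_iff (k : String) : pvRank k = 9 ↔ k ∉ pvPriority := by
  unfold pvRank
  cases hk : PySem.List.index? pvPriority k with
  | none =>
    have e : (match (none : Option Nat) with | some i => (i : Int) | none => (pvPriority.length : Int)) = (pvPriority.length : Int) := rfl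
    rw [e, pvLen]
    have := (PySem.List.index?_eq_none_iff (xs := pvPriority) (v := k)).mp hk
    simpa using this
  | some i =>
    obtain ⟨hlt, hg, -⟩ := PySem.List.getElem_of_index?_eq_some hk
    have hmem : k ∈ pvPriority := (PySem.List.index?_isSome_iff (xs := pvPriority) (v := k)).mp (by rw [hk]; rfl)
    have hi : i < 9 := by simpa [pvPriority] using hlt
    have e : (match (some i : Option Nat) with | some i => (i : Int) | none => (pvPriority.length : Int)) = (i : Int) := rfl
    rw [e]
    constructor
    · intro h
      have : i = 9 := by exact_mod_cast h
      omega
    · intro h; exact absurd hmem h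

-- the entries loop of B is a filterMap
theorem pvEntries_eq (l : List (String × String)) (acc : List (Int × String)) :
    l.foldl (fun (acc : List (Int × String)) (kv : String × String) =>
      if kv.1 = "__name__" then acc
      else
        let sentinel : Int := (pvPriority.length : Int)
        let r : Int :=
          match PySem.List.index? pvPriority kv.1 with
          | some i => (i : Int)
          | none => sentinel
        acc ++ [(r, if r < sentinel then kv.2 else kv.1 ++ "=" ++ kv.2)]) acc
    = acc ++ l.filterMap pvG := by
  induction l generalizing acc with
  | nil => simp
  | cons kv l ih =>
    simp only [List.foldl_cons, List.filterMap_cons]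
    by_cases h : kv.1 = "__name__"
    · rw [if_pos h, show pvG kv = none from by simp [pvG, h], ih]
    · rw [if_neg h,
        show pvG kv = some (pvRank kv.1,
          if pvRank kv.1 < (pvPriority.length : Int) then kv.2 else kv.1 ++ "=" ++ kv.2) from by
            simp [pvG, h],
        ih]
      simp only [List.append_assoc, List.singleton_append]
      rfl

-- A's two loops as filterMap / flatMap
theorem pvA1_eq (P : List String) (labels : List (String × String)) (acc : List String) :
    P.foldl (fun acc key =>
      match labels.lookup key with
      | some v => acc ++ [v]
      | none => acc) acc
    = acc ++ P.flatMap (fun key =>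
        match labels.lookup key with
        | some v => [v]
        | none => []) := by
  induction P generalizing acc with
  | nil => simp
  | cons key P ih =>
    simp only [List.foldl_cons, List.flatMap_cons]
    cases labels.lookup key <;> simp [ih]

theorem pvA2_eq (l : List (String × String)) (acc : List String) :
    l.foldl (fun acc kv =>
      if kv.1 ∉ pvPriority ∧ kv.1 ≠ "__name__" then acc ++ [kv.1 ++ "=" ++ kv.2] else acc) acc
    = acc ++ l.filterMap (fun kv =>
        if kv.1 ∉ pvPriority ∧ kv.1 ≠ "__name__" then some (kv.1 ++ "=" ++ kv.2) else none) := by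
  induction l generalizing acc with
  | nil => simp
  | cons kv l ih =>
    simp only [List.foldl_cons, List.filterMap_cons]
    by_cases h : kv.1 ∉ pvPriority ∧ kv.1 ≠ "__name__" <;> simp [h, ih]

-- stable-insertion lemmas for PySem's sort
theorem pvInsertBy_last {α : Type} (before : α → α → Bool) (x : α) (ys : List α)
    (h : ∀ y ∈ ys, before x y = false) :
    PySem.List.insertBy before x ys = ys ++ [x] := by
  induction ys with
  | nil => rfl
  | cons y ys ih =>
    have hy : before x y = false := h y (by simp)
    simp [PySem.List.insertBy, hy, ih (fun z hz => h z (by simp [hz]))]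

theorem pvInsertBy_append_right {α : Type} (before : α → α → Bool) (x : α) (ys zs : List α)
    (h : ∀ z ∈ zs, before x z = true) :
    PySem.List.insertBy before x (ys ++ zs) = PySem.List.insertBy before x ys ++ zs := by
  induction ys with
  | nil =>
    cases zs with
    | nil => rfl
    | cons z zs => simp [PySem.List.insertBy, h z (by simp)]
  | cons y ys ih =>
    by_cases hy : before x y = true <;> simp [PySem.List.insertBy, hy, ih]

-- buckets: the rank-r entries in input order, concatenated for r = 0..n-1
def pvBuckets (n : Nat) (l : List (Int × String)) : List (Int × String) :=
  (List.range n).flatMap (fun (r : Nat) => l.filter (fun t => t.1 = ((r : Nat) : Int)))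

theorem pvMem_pvBuckets {n : Nat} {l : List (Int × String)} {t : Int × String}
    (h : t ∈ pvBuckets n l) : 0 ≤ t.1 ∧ t.1 < (n : Int) := by
  unfold pvBuckets at h
  simp only [List.mem_flatMap, List.mem_filter, List.mem_range, decide_eq_true_eq] at h
  obtain ⟨r, hr, -, ht⟩ := h
  omega

theorem pvBuckets_append_out {n : Nat} {x : Int × String} (l : List (Int × String))
    (hx : ¬ x.1 < (n : Int)) : pvBuckets n (l ++ [x]) = pvBuckets n l := by
  unfold pvBuckets
  apply List.flatMap_congr
  intro r hr
  have hrn : r < n := List.mem_range.mp hr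
  rw [List.filter_append]
  have : [x].filter (fun t => t.1 = ((r : Nat) : Int)) = [] := by
    have : decide (x.1 = ((r : Nat) : Int)) = false := by
      simp only [decide_eq_false_iff_not]
      omega
    simp [this]
  rw [this, List.append_nil]

theorem pvBuckets_insert {n : Nat} (x : Int × String) (l : List (Int × String))
    (hx0 : 0 ≤ x.1) (hxn : x.1 < (n : Int)) :
    PySem.List.insertBy (fun a b => decide (a.1 < b.1)) x (pvBuckets n l)
      = pvBuckets n (l ++ [x]) := by
  induction n with
  | zero => exact absurd hxn (by omega)
  | succ n ih =>
    have hsplit : ∀ m : List (Int × String), pvBuckets (n + 1) m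
        = pvBuckets n m ++ m.filter (fun t => t.1 = ((n : Nat) : Int)) := by
      intro m
      unfold pvBuckets
      rw [List.range_succ, List.flatMap_append]
      simp
    by_cases he : x.1 = (n : Int)
    · rw [hsplit, pvInsertBy_last, hsplit]
      · have h1 : pvBuckets n (l ++ [x]) = pvBuckets n l := pvBuckets_append_out l (by omega)
        rw [h1, List.filter_append]
        simp [he]
      · intro y hy
        rcases List.mem_append.mp hy with hy | hy
        · have := pvMem_pvBuckets hy
          simp only [decide_eq_false_iff_not]
          omega
        · have := of_decide_eq_true (List.mem_filter.mp hy).2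
          simp only [decide_eq_false_iff_not]
          omega
    · have hxn' : x.1 < (n : Int) := by omega
      rw [hsplit, pvInsertBy_append_right, ih hxn', hsplit, List.filter_append]
      · have : [x].filter (fun t => t.1 = ((n : Nat) : Int)) = [] := by simp [he]
        rw [this, List.append_nil]
      · intro z hz
        have := of_decide_eq_true (List.mem_filter.mp hz).2
        simp only [decide_eq_true_eq]
        omega

theorem pvSorted_eq_pvBuckets (l : List (Int × String))
    (h : ∀ t ∈ l, 0 ≤ t.1 ∧ t.1 < 10) :
    PySem.List.sorted l (fun t => t.1) false = pvBuckets 10 l := by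
  rw [PySem.List.sorted_eq_foldl_insertBy]
  induction l using List.reverseRecOn with
  | nil => rfl
  | append_singleton l x ih =>
    rw [List.foldl_append]
    simp only [List.foldl_cons, List.foldl_nil]
    rw [ih (fun t ht => h t (by simp [ht]))]
    have hx := h x (by simp)
    exact pvBuckets_insert x l hx.1 (by exact_mod_cast hx.2)

theorem pvBucket_empty (s : String) (r : Nat) (hr : PySem.List.index? pvPriority s = some r) :
    ∀ l : List (String × String), (∀ kv ∈ l, kv.1 ≠ s) →
      (l.filterMap pvG).filter (fun t => t.1 = ((r : Nat) : Int)) = [] := by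
  intro l
  induction l with
  | nil => intro _; rfl
  | cons kv l ih =>
    intro h
    have hk : kv.1 ≠ s := h kv (by simp)
    have hrank : pvRank kv.1 ≠ ((r : Nat) : Int) := fun hc => hk ((pvRank_eq_iff s r hr kv.1).mp hc)
    simp only [List.filterMap_cons]
    by_cases hn : kv.1 = "__name__"
    · rw [show pvG kv = none from by simp [pvG, hn]]
      exact ih (fun z hz => h z (by simp [hz]))
    · rw [show pvG kv = some (pvRank kv.1,
          if pvRank kv.1 < (pvPriority.length : Int) then kv.2 else kv.1 ++ "=" ++ kv.2) from by
            simp [pvG, hn]]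
      rw [List.filter_cons_of_neg (by simpa using hrank)]
      exact ih (fun z hz => h z (by simp [hz]))

theorem pvBucket_priority (s : String) (r : Nat) (hr : PySem.List.index? pvPriority s = some r)
    (hs : s ≠ "__name__") :
    ∀ l : List (String × String), (l.map Prod.fst).Nodup →
      (l.filterMap pvG).filter (fun t => t.1 = ((r : Nat) : Int)) =
        (match l.lookup s with
         | some v => [(((r : Nat) : Int), v)]
         | none => []) := by
  have hr9 : r < 9 := by
    obtain ⟨hlt, -, -⟩ := PySem.List.getElem_of_index?_eq_some hr
    simpa [pvPriority] using hlt
  intro l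
  induction l with
  | nil => intro _; rfl
  | cons kv l ih =>
    intro hnd
    rw [List.map_cons, List.nodup_cons] at hnd
    obtain ⟨hkv, hnd⟩ := hnd
    simp only [List.filterMap_cons]
    by_cases hk : kv.1 = s
    · have hn : kv.1 ≠ "__name__" := by rw [hk]; exact hs
      have hrank : pvRank kv.1 = ((r : Nat) : Int) := (pvRank_eq_iff s r hr kv.1).mpr hk
      rw [show pvG kv = some (pvRank kv.1,
          if pvRank kv.1 < (pvPriority.length : Int) then kv.2 else kv.1 ++ "=" ++ kv.2) from by
            simp [pvG, hn]]
      rw [hrank, pvLen, if_pos (by exact_mod_cast hr9)]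
      rw [List.filter_cons_of_pos (by simp)]
      have htail : (l.filterMap pvG).filter (fun t => t.1 = ((r : Nat) : Int)) = [] := by
        apply pvBucket_empty s r hr
        intro z hz hzs
        exact hkv (by rw [← hk] at hzs; exact (List.mem_map.mpr ⟨z, hz, hzs.symm ▸ rfl⟩))
      rw [htail]
      have hlook : (kv :: l).lookup s = some kv.2 := by
        rcases kv with ⟨k1, k2⟩
        simp only at hk
        simp [List.lookup, hk]
      rw [hlook]
    · have hrank : pvRank kv.1 ≠ ((r : Nat) : Int) := fun hc => hk ((pvRank_eq_iff s r hr kv.1).mp hc)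
      have hlook : (kv :: l).lookup s = l.lookup s := by
        rcases kv with ⟨k1, k2⟩
        simp only at hk
        have hb : (s == k1) = false := beq_eq_false_iff_ne.mpr (Ne.symm hk)
        simp [List.lookup, hb]
      rw [hlook]
      by_cases hn : kv.1 = "__name__"
      · rw [show pvG kv = none from by simp [pvG, hn]]
        exact ih hnd
      · rw [show pvG kv = some (pvRank kv.1,
            if pvRank kv.1 < (pvPriority.length : Int) then kv.2 else kv.1 ++ "=" ++ kv.2) from by
              simp [pvG, hn]]
        rw [List.filter_cons_of_neg (by simpa using hrank)]
        exact ih hnd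

theorem pvBucket_rest (l : List (String × String)) :
    ((l.filterMap pvG).filter (fun t => t.1 = ((9 : Nat) : Int))).map Prod.snd =
      l.filterMap (fun kv =>
        if kv.1 ∉ pvPriority ∧ kv.1 ≠ "__name__" then some (kv.1 ++ "=" ++ kv.2) else none) := by
  induction l with
  | nil => rfl
  | cons kv l ih =>
    simp only [List.filterMap_cons]
    by_cases hn : kv.1 = "__name__"
    · rw [show pvG kv = none from by simp [pvG, hn]]
      rw [if_neg (by simp [hn])]
      exact ih
    · rw [show pvG kv = some (pvRank kv.1,
          if pvRank kv.1 < (pvPriority.length : Int) then kv.2 else kv.1 ++ "=" ++ kv.2) from by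
            simp [pvG, hn]]
      by_cases hm : kv.1 ∈ pvPriority
      · have : pvRank kv.1 ≠ 9 := fun hc => (pvRank_eq_sentinel_iff kv.1).mp hc hm
        rw [List.filter_cons_of_neg (by simp; exact_mod_cast this)]
        rw [if_neg (by simp [hm])]
        exact ih
      · have h9 : pvRank kv.1 = 9 := (pvRank_eq_sentinel_iff kv.1).mpr hm
        rw [List.filter_cons_of_pos (by simp; exact_mod_cast h9)]
        rw [h9, pvLen, if_neg (by omega), List.map_cons]
        rw [if_pos ⟨hm, hn⟩]
        rw [ih]

theorem pvMapSnd_match (o : Option String) (r : Nat) :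
    (match o with
     | some v => [(((r : Nat) : Int), v)]
     | none => ([] : List (Int × String))).map Prod.snd =
      (match o with | some v => [v] | none => []) := by
  cases o <;> rfl

theorem pvBuckets_ten (e : List (Int × String)) :
    pvBuckets 10 e =
      e.filter (fun t => t.1 = ((0 : Nat) : Int)) ++ (e.filter (fun t => t.1 = ((1 : Nat) : Int)) ++
      (e.filter (fun t => t.1 = ((2 : Nat) : Int)) ++ (e.filter (fun t => t.1 = ((3 : Nat) : Int)) ++
      (e.filter (fun t => t.1 = ((4 : Nat) : Int)) ++ (e.filter (fun t => t.1 = ((5 : Nat) : Int)) ++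
      (e.filter (fun t => t.1 = ((6 : Nat) : Int)) ++ (e.filter (fun t => t.1 = ((7 : Nat) : Int)) ++
      (e.filter (fun t => t.1 = ((8 : Nat) : Int)) ++ (e.filter (fun t => t.1 = ((9 : Nat) : Int))
        ++ []))))))))) := by
  unfold pvBuckets
  rfl

theorem pvG_bounds (labels : List (String × String)) :
    ∀ t ∈ labels.filterMap pvG, 0 ≤ t.1 ∧ t.1 < 10 := by
  intro t ht
  obtain ⟨kv, -, hg⟩ := List.mem_filterMap.mp ht
  unfold pvG at hg
  by_cases hn : kv.1 = "__name__"
  · rw [if_pos hn] at hg; cases hg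
  · rw [if_neg hn] at hg
    have := Option.some.inj hg
    have h1 := pvRank_bounds kv.1
    rw [← this]
    exact h1

-- ===== VERDICT (by name: the statement is the Claim_ definition above) =====
theorem format_labels_py_spec : Claim_equal_format_labels_py := by
  intro labels _ hpre
  unfold Spec_format_labels_py format_labels_py format_labels_py_alt
  show (if (labels.foldl (fun acc kv =>
        if kv.1 ∉ pvPriority ∧ kv.1 ≠ "__name__" then acc ++ [kv.1 ++ "=" ++ kv.2] else acc)
        (pvPriority.foldl (fun acc key =>
          match labels.lookup key with
          | some v => acc ++ [v]
          | none => acc) [])).isEmpty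
      then "unknown"
      else PySem.Str.join ":" (labels.foldl (fun acc kv =>
        if kv.1 ∉ pvPriority ∧ kv.1 ≠ "__name__" then acc ++ [kv.1 ++ "=" ++ kv.2] else acc)
        (pvPriority.foldl (fun acc key =>
          match labels.lookup key with
          | some v => acc ++ [v]
          | none => acc) [])))
    = (if ((PySem.List.sorted (labels.foldl (fun (acc : List (Int × String)) (kv : String × String) =>
          if kv.1 = "__name__" then acc
          else
            let sentinel : Int := (pvPriority.length : Int)
            let r : Int :=
              match PySem.List.index? pvPriority kv.1 with
              | some i => (i : Int)
              | none => sentinel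
            acc ++ [(r, if r < sentinel then kv.2 else kv.1 ++ "=" ++ kv.2)]) [])
          (fun t => t.1) false).map (fun t => t.2)).isEmpty
      then "unknown"
      else PySem.Str.join ":" ((PySem.List.sorted (labels.foldl (fun (acc : List (Int × String)) (kv : String × String) =>
          if kv.1 = "__name__" then acc
          else
            let sentinel : Int := (pvPriority.length : Int)
            let r : Int :=
              match PySem.List.index? pvPriority kv.1 with
              | some i => (i : Int)
              | none => sentinel
            acc ++ [(r, if r < sentinel then kv.2 else kv.1 ++ "=" ++ kv.2)]) [])
          (fun t => t.1) false).map (fun t => t.2)))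
  rw [pvA1_eq]
  rw [pvA2_eq]
  rw [pvEntries_eq]
  simp only [List.nil_append]
  rw [pvSorted_eq_pvBuckets _ (pvG_bounds labels)]
  rw [pvBuckets_ten]
  simp only [List.map_append]
  rw [pvBucket_priority "resource" 0 (by rfl) (by decide) labels hpre,
      pvBucket_priority "verb" 1 (by rfl) (by decide) labels hpre,
      pvBucket_priority "scope" 2 (by rfl) (by decide) labels hpre,
      pvBucket_priority "instance" 3 (by rfl) (by decide) labels hpre,
      pvBucket_priority "operation" 4 (by rfl) (by decide) labels hpre,
      pvBucket_priority "type" 5 (by rfl) (by decide) labels hpre,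
      pvBucket_priority "service" 6 (by rfl) (by decide) labels hpre,
      pvBucket_priority "group" 7 (by rfl) (by decide) labels hpre,
      pvBucket_priority "kind" 8 (by rfl) (by decide) labels hpre,
      pvBucket_rest labels]
  simp only [pvMapSnd_match]
  simp only [pvPriority, List.flatMap_cons, List.flatMap_nil, List.append_assoc, List.append_nil,
    List.map_nil]
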